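-- pv_equiv track=rewrite | github.com/zyadhany/alx-higher_level_programming | 0x04-python-more_data_structures/2-uniq_add.py | uniq_add
-- ===== SOURCE A (Python) =====
-- def uniq_add(my_list=[]):
--     summ = 0
--
--     freq = {}
--
--     for i in my_list:
--         if not freq.get(i, 0):
--             summ += i
--         freq[i] = 1
--
--     return (summ)
-- ===== SOURCE B (Python) =====
-- def uniq_add(my_list=[]):
--     """Sort a copy, then scan once, adding each value only when it differs
--     from its predecessor (duplicates are adjacent after sorting)."""
--     total = 0
--     prev = None
--     for x in sorted(my_list):
--         if prev is None or x != prev: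
--             total += x
--         prev = x
--     return total
-- ===== Notes on version B (the rewrite author's own statement) =====
-- stated objective: alternative
-- what changed: Replaces A's hash-based single pass (seen-dict plus accumulator) by a sort-then-adjacent-scan: sort the list so duplicates become adjacent, then one scan adding each value only when it differs from its predecessor.
import Mathlib
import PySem

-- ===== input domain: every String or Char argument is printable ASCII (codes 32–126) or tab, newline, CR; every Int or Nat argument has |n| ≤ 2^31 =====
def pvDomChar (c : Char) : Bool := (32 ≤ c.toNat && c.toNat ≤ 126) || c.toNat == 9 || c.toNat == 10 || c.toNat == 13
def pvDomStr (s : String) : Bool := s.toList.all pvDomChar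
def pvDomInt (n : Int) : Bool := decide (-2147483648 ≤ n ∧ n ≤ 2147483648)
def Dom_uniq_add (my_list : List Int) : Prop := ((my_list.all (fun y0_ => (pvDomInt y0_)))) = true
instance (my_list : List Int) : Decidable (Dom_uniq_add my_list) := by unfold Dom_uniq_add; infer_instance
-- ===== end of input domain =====

-- B replaces A's seen-dict single pass by a sort-then-adjacent-scan (objective: alternative algorithm, not faster).


-- ===== PORT A =====
-- for i in my_list: if not freq.get(i, 0): summ += i; freq[i] = 1
def uniq_add (my_list : List Int) : Int :=
  (my_list.foldl
    (fun (st : Int × PySem.Dict Int Int) i =>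
      ((if st.2.getD i 0 = 0 then st.1 + i else st.1), st.2.insert i 1))
    (0, PySem.Dict.empty)).1

-- ===== PORT B =====
-- for x in sorted(my_list): if prev is None or x != prev: total += x; prev = x
def uniq_add_alt (my_list : List Int) : Int :=
  ((PySem.List.sorted my_list (fun x => x) false).foldl
    (fun (st : Int × Option Int) x =>
      ((if st.2 = none ∨ st.2 ≠ some x then st.1 + x else st.1), some x))
    (0, none)).1

-- ===== PRECONDITION & SPEC =====
def Spec_uniq_add (my_list : List Int) (out : Int) : Prop := out = uniq_add_alt my_list
instance (my_list : List Int) (out : Int) : Decidable (Spec_uniq_add my_list out) := by unfold Spec_uniq_add; infer_instance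

-- ===== CLAIM (what is proved, stated in full; the proofs are below) =====
def Claim_equal_uniq_add : Prop := ∀ (my_list : List Int), Dom_uniq_add my_list → Spec_uniq_add my_list (uniq_add my_list)

-- ===== LEMMAS AND PROOFS =====

/-- Sum of the first occurrences in `l` of elements not already in `seen` (A's loop). -/
def pvNewSum : List Int → List Int → Int
  | _, [] => 0
  | seen, i :: t => (if i ∈ seen then 0 else i) + pvNewSum (i :: seen) t

theorem pvNewSum_congr (l : List Int) : ∀ (s s' : List Int),
    (∀ x, x ∈ s ↔ x ∈ s') → pvNewSum s l = pvNewSum s' l := by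
  induction l with
  | nil => intro s s' _; rfl
  | cons i t ih =>
      intro s s' h
      simp only [pvNewSum, h i]
      rw [ih (i :: s) (i :: s') (by intro x; simp [h x])]

theorem pvLoopA (l : List Int) : ∀ (s : Int) (d : PySem.Dict Int Int),
    (∀ k, d.getD k 0 = if k ∈ d.keys then 1 else 0) →
    (l.foldl
      (fun (st : Int × PySem.Dict Int Int) i =>
        ((if st.2.getD i 0 = 0 then st.1 + i else st.1), st.2.insert i 1))
      (s, d)).1 = s + pvNewSum d.keys l := by
  induction l with
  | nil => intro s d _; simp [pvNewSum]
  | cons i t ih =>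
      intro s d h
      simp only [List.foldl_cons]
      have hkeys : ∀ x, x ∈ (d.insert i (1 : Int)).keys ↔ x ∈ i :: d.keys := by
        intro x; simp [PySem.Dict.mem_keys_insert]
      have h' : ∀ k, (d.insert i (1 : Int)).getD k 0 = if k ∈ (d.insert i (1 : Int)).keys then 1 else 0 := by
        intro k
        rw [PySem.Dict.getD_insert]
        by_cases hk : k = i
        · simp [hk, hkeys]
        · simp [hk, h k, hkeys]
      rw [ih _ _ h', pvNewSum_congr t _ _ hkeys]
      by_cases hi : i ∈ d.keys
      · have : d.getD i 0 = 1 := by rw [h i]; simp [hi]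
        simp [pvNewSum, this, hi]
      · have : d.getD i 0 = 0 := by rw [h i]; simp [hi]
        simp [pvNewSum, this, hi, add_assoc]

theorem pvLoopSet (l : List Int) : ∀ (s : List Int),
    (PySem.Set.update s l).sum = s.sum + pvNewSum s l := by
  induction l with
  | nil => intro s; simp [PySem.Set.update, pvNewSum]
  | cons i t ih =>
      intro s
      rw [PySem.Set.update_cons]
      by_cases hi : i ∈ s
      · have hadd : PySem.Set.add s i = s := by
          simp [PySem.Set.add, PySem.Set.contains, hi]
        rw [hadd, ih s, pvNewSum_congr t s (i :: s)
            (by intro x; simp only [List.mem_cons]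
                constructor
                · exact Or.inr
                · rintro (rfl | h); exacts [hi, h])]
        simp [pvNewSum, hi]
      · have hadd : PySem.Set.add s i = s ++ [i] := by
          simp [PySem.Set.add, PySem.Set.contains, hi]
        rw [hadd, ih (s ++ [i]),
            pvNewSum_congr t (s ++ [i]) (i :: s) (by intro x; simp; tauto)]
        simp [pvNewSum, hi]; ring

/-- A's result is the sum of the distinct elements in first-occurrence order. -/
theorem pvA_eq (l : List Int) : uniq_add l = (PySem.Set.ofList l).sum := by
  rw [uniq_add, pvLoopA l 0 PySem.Dict.empty (by intro k; simp),
      ← PySem.Set.update_nil_left, pvLoopSet]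
  simp [PySem.Dict.keys_empty]

/-- The elements B's scan keeps: those differing from the running predecessor. -/
def pvAdjDedup : Option Int → List Int → List Int
  | _, [] => []
  | p, x :: t => if p = none ∨ p ≠ some x then x :: pvAdjDedup (some x) t
                 else pvAdjDedup (some x) t

theorem pvLoopB (l : List Int) : ∀ (acc : Int) (p : Option Int),
    (l.foldl
      (fun (st : Int × Option Int) x =>
        ((if st.2 = none ∨ st.2 ≠ some x then st.1 + x else st.1), some x))
      (acc, p)).1 = acc + (pvAdjDedup p l).sum := by
  induction l with
  | nil => intro acc p; simp [pvAdjDedup]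
  | cons x t ih =>
      intro acc p
      simp only [List.foldl_cons, pvAdjDedup]
      by_cases hp : p = none ∨ p ≠ some x
      · simp [hp, ih, add_assoc]
      · simp [hp, ih]

/-- On a sorted list with lower bound `p`, the adjacent scan is strictly
    increasing and keeps exactly the members differing from `p`. -/
theorem pvAdjDedup_spec (l : List Int) : ∀ (p : Option Int),
    l.Pairwise (· ≤ ·) → (∀ a, p = some a → ∀ y ∈ l, a ≤ y) →
    (pvAdjDedup p l).Pairwise (· < ·) ∧
      (∀ z, z ∈ pvAdjDedup p l ↔ z ∈ l ∧ p ≠ some z) := by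
  induction l with
  | nil => intro p _ _; simp [pvAdjDedup]
  | cons x t ih =>
      intro p hpw hlb
      have hxle : ∀ y ∈ t, x ≤ y := (List.pairwise_cons.mp hpw).1
      obtain ⟨ihp, ihm⟩ := ih (some x) (List.pairwise_cons.mp hpw).2
        (by intro a ha y hy; cases ha; exact hxle y hy)
      by_cases hp : p = some x
      · -- p = some x: the head is skipped
        subst hp
        have hcond : ¬ (some x = none ∨ some x ≠ some x) := by simp
        refine ⟨?_, ?_⟩
        · simpa only [pvAdjDedup, if_neg hcond] using ihp
        · intro z
          simp only [pvAdjDedup, if_neg hcond, List.mem_cons, ihm]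
          constructor
          · rintro ⟨hzt, hne⟩; exact ⟨Or.inr hzt, hne⟩
          · rintro ⟨(rfl | hzt), hne⟩
            · exact absurd rfl hne
            · exact ⟨hzt, hne⟩
      · -- the head is kept
        have hcond : (p = none ∨ p ≠ some x) := by
          cases p with
          | none => exact Or.inl rfl
          | some a => exact Or.inr hp
        refine ⟨?_, ?_⟩
        · simp only [pvAdjDedup, if_pos hcond]
          refine List.pairwise_cons.mpr ⟨?_, ihp⟩
          intro z hz
          obtain ⟨hzt, hne⟩ := (ihm z).mp hz
          exact lt_of_le_of_ne (hxle z hzt) (fun h => hne (by rw [h]))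
        · intro z
          simp only [pvAdjDedup, if_pos hcond, List.mem_cons, ihm]
          constructor
          · rintro (rfl | ⟨hzt, hne⟩)
            · exact ⟨Or.inl rfl, hp⟩
            · refine ⟨Or.inr hzt, ?_⟩
              intro hpz
              have hzx : x = z := le_antisymm (hxle z hzt) (hlb z hpz x (List.mem_cons_self ..))
              exact hne (by rw [hzx])
          · rintro ⟨(rfl | hzt), hpz⟩
            · exact Or.inl rfl
            · by_cases hzx : z = x
              · exact Or.inl hzx
              · exact Or.inr ⟨hzt, fun h => hzx (by injection h with h; exact h.symm)⟩

-- ===== VERDICT (by name: the statement is the Claim_ definition above) =====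
theorem uniq_add_spec : Claim_equal_uniq_add := by
  intro l _
  show uniq_add l = uniq_add_alt l
  rw [pvA_eq, uniq_add_alt, pvLoopB, zero_add]
  have hs : (PySem.List.sorted l (fun x => x) false).Pairwise (· ≤ ·) := by
    simpa using PySem.List.sorted_pairwise (xs := l) (key := fun x => x)
  obtain ⟨hpw, hmem⟩ := pvAdjDedup_spec (PySem.List.sorted l (fun x => x) false) none hs
    (by rintro a h; cases h)
  have hnd : (pvAdjDedup none (PySem.List.sorted l (fun x => x) false)).Nodup :=
    hpw.imp (fun h => ne_of_lt h)
  have hperm : (PySem.Set.ofList l).Perm (pvAdjDedup none (PySem.List.sorted l (fun x => x) false)) := by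
    rw [List.perm_ext_iff_of_nodup (PySem.Set.nodup_ofList l) hnd]
    intro z
    rw [hmem z, PySem.Set.mem_ofList]
    simp [PySem.List.mem_sorted]
  exact hperm.sum_eq
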